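-- pv_equiv track=rewrite | github.com/ArvorCo/PNAD | scripts/pnad.py | _brazil_band_colors
-- ===== SOURCE A (Python) =====
-- from typing import Dict, Iterable, List, Optional, Sequence, Tuple
--
-- def _brazil_band_colors(n: int) -> List[object]:
--     # Brasil-inspired socioeconomic palette from poorer to richer:
--     # green -> yellow -> blue -> white.
--     base = [
--         "1;38;5;46",  # vivid green
--         "1;38;5;226",  # vivid yellow
--         "1;38;5;21",  # vivid blue
--         "1;38;5;15",  # bright white
--     ]
--     if n <= len(base):
--         return base[:n]
--     out = []
--     for i in range(n):
--         out.append(base[i % len(base)])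
--     return out
-- ===== SOURCE B (Python) =====
-- from typing import List
--
-- def _brazil_band_colors(n: int) -> List[object]:
--     base = [
--         "1;38;5;46",
--         "1;38;5;226",
--         "1;38;5;21",
--         "1;38;5;15",
--     ]
--     if n <= len(base):
--         return base[:n]
--     q, r = divmod(n, len(base))
--     return base * q + base[:r]
-- ===== Notes on version B (the rewrite author's own statement) =====
-- stated objective: idiomatic
-- what changed: Replaced the element-by-element modulo-indexing loop with a closed-form divmod: whole-palette replication base*q plus a partial tail base[:r].
import Mathlib
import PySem

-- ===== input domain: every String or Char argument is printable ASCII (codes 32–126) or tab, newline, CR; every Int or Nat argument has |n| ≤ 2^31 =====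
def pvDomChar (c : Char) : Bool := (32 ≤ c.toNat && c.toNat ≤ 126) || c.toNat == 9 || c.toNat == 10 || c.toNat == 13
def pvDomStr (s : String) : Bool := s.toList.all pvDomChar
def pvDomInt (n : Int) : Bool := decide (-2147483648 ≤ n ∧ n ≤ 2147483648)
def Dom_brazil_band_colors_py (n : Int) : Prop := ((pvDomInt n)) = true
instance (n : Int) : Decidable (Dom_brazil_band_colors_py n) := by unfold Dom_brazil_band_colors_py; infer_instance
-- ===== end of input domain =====

-- B replaces A's element-by-element modulo-indexing loop with a closed-form divmod:
-- whole-palette replication plus a partial tail (idiomatic; same return value).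


-- ===== PORT A =====
def pvBase : List String := ["1;38;5;46", "1;38;5;226", "1;38;5;21", "1;38;5;15"]

def brazil_band_colors_py (n : Int) : List String :=
  if n ≤ (pvBase.length : Int) then
    PySem.List.slice pvBase none (some n)
  else
    (PySem.List.pyRange 0 n 1).foldl
      (fun out i => out ++ [PySem.List.pyGetD pvBase (PySem.Int.mod i (pvBase.length : Int)) ""]) []

-- ===== PORT B =====
def brazil_band_colors_py_alt (n : Int) : List String :=
  if n ≤ (pvBase.length : Int) then
    PySem.List.slice pvBase none (some n)
  else
    let q := PySem.Int.floordiv n (pvBase.length : Int)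
    let r := PySem.Int.mod n (pvBase.length : Int)
    (List.replicate q.toNat pvBase).flatten ++ PySem.List.slice pvBase none (some r)

-- ===== PRECONDITION & SPEC =====
def Spec_brazil_band_colors_py (n : Int) (out : List String) : Prop := out = brazil_band_colors_py_alt n
instance (n : Int) (out : List String) : Decidable (Spec_brazil_band_colors_py n out) := by unfold Spec_brazil_band_colors_py; infer_instance

-- ===== CLAIM (what is proved, stated in full; the proofs are below) =====
def Claim_equal_brazil_band_colors_py : Prop := ∀ (n : Int), Dom_brazil_band_colors_py n → Spec_brazil_band_colors_py n (brazil_band_colors_py n)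

-- ===== LEMMAS AND PROOFS =====

-- A's loop over range(m) builds ⌊m/4⌋ full palettes plus the first m%4 entries.
theorem pv_loop_closed (m : Nat) :
    (PySem.List.pyRange 0 (m : Int) 1).foldl
      (fun out i => out ++ [PySem.List.pyGetD pvBase (PySem.Int.mod i (pvBase.length : Int)) ""]) []
    = (List.replicate (m / 4) pvBase).flatten ++ pvBase.take (m % 4) := by
  induction m with
  | zero => decide
  | succ m ih =>
    rw [show ((m + 1 : Nat) : Int) = (m : Int) + 1 by push_cast; ring,
        PySem.List.pyRange_one_succ_right (by positivity), List.foldl_append, ih]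
    simp only [List.foldl_cons, List.foldl_nil]
    have hmod : PySem.Int.mod (m : Int) (pvBase.length : Int) = ((m % 4 : Nat) : Int) := by
      simp only [PySem.Int.mod, pvBase, List.length_cons, List.length_nil]
      rw [Int.fmod_eq_emod]; omega
    rw [hmod, PySem.List.pyGetD_natCast]
    have h4 : m % 4 = 0 ∨ m % 4 = 1 ∨ m % 4 = 2 ∨ m % 4 = 3 := by omega
    rcases h4 with h | h | h | h
    · have hd : (m + 1) / 4 = m / 4 := by omega
      have hm : (m + 1) % 4 = 1 := by omega
      rw [hd, hm, h, List.append_assoc]; rfl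
    · have hd : (m + 1) / 4 = m / 4 := by omega
      have hm : (m + 1) % 4 = 2 := by omega
      rw [hd, hm, h, List.append_assoc]; rfl
    · have hd : (m + 1) / 4 = m / 4 := by omega
      have hm : (m + 1) % 4 = 3 := by omega
      rw [hd, hm, h, List.append_assoc]; rfl
    · have hd : (m + 1) / 4 = m / 4 + 1 := by omega
      have hm : (m + 1) % 4 = 0 := by omega
      rw [hd, hm, h, List.append_assoc]
      rw [show List.replicate (m / 4 + 1) pvBase = List.replicate (m / 4) pvBase ++ [pvBase] from
            List.replicate_succ' ..]
      simp only [List.flatten_append, List.flatten_cons, List.flatten_nil, List.append_nil,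
        List.append_assoc]
      congr 1

-- ===== VERDICT (by name: the statement is the Claim_ definition above) =====
theorem brazil_band_colors_py_spec : Claim_equal_brazil_band_colors_py := by
  intro n _
  unfold Spec_brazil_band_colors_py brazil_band_colors_py brazil_band_colors_py_alt
  by_cases h : n ≤ (pvBase.length : Int)
  · simp [h]
  · simp only [h, if_false]
    push Not at h
    have hn : n = ((n.toNat : Nat) : Int) := by omega
    rw [hn, pv_loop_closed]
    have hq : (PySem.Int.floordiv ((n.toNat : Nat) : Int) (pvBase.length : Int)).toNat
        = n.toNat / 4 := by
      simp only [PySem.Int.floordiv, pvBase, List.length_cons, List.length_nil]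
      rw [Int.fdiv_eq_ediv]; omega
    have hr : PySem.Int.mod ((n.toNat : Nat) : Int) (pvBase.length : Int)
        = ((n.toNat % 4 : Nat) : Int) := by
      simp only [PySem.Int.mod, pvBase, List.length_cons, List.length_nil]
      rw [Int.fmod_eq_emod]; omega
    rw [hq, hr, PySem.List.slice_to_natCast]
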